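-- pv_equiv track=rewrite | github.com/Lvetto/CNAP-lib | CNA.py | get_feature_vectors
-- ===== SOURCE A (Python) =====
-- def get_feature_vectors(signatures):
--     feature_vectors = {}
--
--     for bond, signature in zip(signatures.keys(), signatures.values()):
--         i,j = bond
--
--         # make sure atoms i,j are in the dict
--         if (i not in feature_vectors.keys()):
--             feature_vectors[i] = {}
--
--         if (j not in feature_vectors.keys()):
--             feature_vectors[j] = {}
--
--         # if signature was already encountered for atom i, add 1 to the number of occurences, otherwise set it to 1
--         if (signature not in feature_vectors[i].keys()):
--             feature_vectors[i][signature] = 1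
--         else:
--             feature_vectors[i][signature] += 1
--
--         # if signature was already encountered for atom j, add 1 to the number of occurences, otherwise set it to 1
--         if (signature not in feature_vectors[j].keys()):
--             feature_vectors[j][signature] = 1
--         else:
--             feature_vectors[j][signature] += 1
--
--     return feature_vectors
-- ===== SOURCE B (Python) =====
-- def get_feature_vectors(signatures):
--     # Flat pass: emit one (atom, signature) record per endpoint of each bond.
--     pairs = [(atom, signature) for bond, signature in signatures.items() for atom in bond]
--     # Aggregate all records at once with a single flat counter keyed by (atom, signature).
--     counts = {}
--     for key in pairs:
--         counts[key] = counts.get(key, 0) + 1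
--     # Regroup the flat table into the nested {atom: {signature: count}} shape.
--     feature_vectors = {}
--     for (atom, signature), c in counts.items():
--         feature_vectors.setdefault(atom, {})[signature] = c
--     return feature_vectors
-- ===== Notes on version B (the rewrite author's own statement) =====
-- stated objective: alternative
-- what changed: B replaces A's single incremental pass that grows the nested dict bond by bond with a three-stage pipeline: flatten the bonds into a list of (atom, signature) records (i before j), aggregate them all with one flat dict keyed by (atom, signature), then regroup that flat table into the nested {atom: {signature: count}} result.
import Mathlib
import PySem

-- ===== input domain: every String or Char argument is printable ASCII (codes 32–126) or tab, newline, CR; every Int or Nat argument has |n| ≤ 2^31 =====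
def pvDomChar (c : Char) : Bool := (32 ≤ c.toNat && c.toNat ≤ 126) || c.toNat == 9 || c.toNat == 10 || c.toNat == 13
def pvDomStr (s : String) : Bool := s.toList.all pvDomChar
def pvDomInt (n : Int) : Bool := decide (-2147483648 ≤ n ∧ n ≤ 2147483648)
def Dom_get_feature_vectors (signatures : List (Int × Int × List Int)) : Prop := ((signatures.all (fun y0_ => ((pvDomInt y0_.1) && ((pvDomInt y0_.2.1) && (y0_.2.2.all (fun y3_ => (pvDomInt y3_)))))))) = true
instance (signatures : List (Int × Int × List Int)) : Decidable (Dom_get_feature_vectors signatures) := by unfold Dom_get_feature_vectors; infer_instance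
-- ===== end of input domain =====

-- B replaces A's single incremental nested-dict pass with a flatten / flat-count / regroup
-- pipeline (alternative decomposition, same asymptotic cost); proved to return the same value.

-- ===== PORT A =====
-- the body of A's loop, one bond at a time (dict of dicts; insertion order preserved)
def gfvStepA (fv : PySem.Dict Int (PySem.Dict (List Int) Int)) (b : Int × Int × List Int) :
    PySem.Dict Int (PySem.Dict (List Int) Int) :=
  let i := b.1
  let j := b.2.1
  let signature := b.2.2
  -- make sure atoms i,j are in the dict
  let fv := if fv.contains i then fv else fv.insert i PySem.Dict.empty
  let fv := if fv.contains j then fv else fv.insert j PySem.Dict.empty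
  -- if signature was already encountered for atom i, add 1, otherwise set it to 1
  let di := fv.getD i PySem.Dict.empty
  let fv := if di.contains signature = false then fv.insert i (di.insert signature 1)
            else fv.insert i (di.insert signature (di.getD signature 0 + 1))
  -- same for atom j
  let dj := fv.getD j PySem.Dict.empty
  if dj.contains signature = false then fv.insert j (dj.insert signature 1)
  else fv.insert j (dj.insert signature (dj.getD signature 0 + 1))

def get_feature_vectors (signatures : List (Int × Int × List Int)) : List (Int × List (List Int × Int)) :=
  (signatures.foldl gfvStepA PySem.Dict.empty).items.map (fun p => (p.1, p.2.items))

-- ===== PORT B =====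
-- regroup step: feature_vectors.setdefault(atom, {})[signature] = c
def gfvStepR (fv : PySem.Dict Int (PySem.Dict (List Int) Int)) (kc : (Int × List Int) × Int) :
    PySem.Dict Int (PySem.Dict (List Int) Int) :=
  let fv := fv.setdefault kc.1.1 PySem.Dict.empty
  fv.insert kc.1.1 ((fv.getD kc.1.1 PySem.Dict.empty).insert kc.1.2 kc.2)

def get_feature_vectors_alt (signatures : List (Int × Int × List Int)) : List (Int × List (List Int × Int)) :=
  -- flat pass: one (atom, signature) record per endpoint of each bond
  let pairs := signatures.flatMap (fun b => [(b.1, b.2.2), (b.2.1, b.2.2)])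
  -- aggregate all records with a single flat counter keyed by (atom, signature)
  let counts : PySem.Dict (Int × List Int) Int :=
    pairs.foldl (fun c key => c.insert key (c.getD key 0 + 1)) PySem.Dict.empty
  -- regroup the flat table into the nested shape
  let fv := counts.items.foldl gfvStepR PySem.Dict.empty
  fv.items.map (fun p => (p.1, p.2.items))

-- ===== PRECONDITION & SPEC =====
def Spec_get_feature_vectors (signatures : List (Int × Int × List Int)) (out : List (Int × List (List Int × Int))) : Prop := out = get_feature_vectors_alt signatures
instance (signatures : List (Int × Int × List Int)) (out : List (Int × List (List Int × Int))) : Decidable (Spec_get_feature_vectors signatures out) := by unfold Spec_get_feature_vectors; infer_instance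

-- ===== CLAIM (what is proved, stated in full; the proofs are below) =====
def Claim_equal_get_feature_vectors : Prop := ∀ (signatures : List (Int × Int × List Int)), Dom_get_feature_vectors signatures → Spec_get_feature_vectors signatures (get_feature_vectors signatures)

-- ===== LEMMAS AND PROOFS =====

-- proof-side helpers: the per-(atom,signature)-record step equivalent to half of A's bond step,
-- and the setdefault-free form of B's regroup step
def gfvStepP (fv : PySem.Dict Int (PySem.Dict (List Int) Int)) (p : Int × List Int) :
    PySem.Dict Int (PySem.Dict (List Int) Int) :=
  let fv := if fv.contains p.1 then fv else fv.insert p.1 PySem.Dict.empty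
  let d := fv.getD p.1 PySem.Dict.empty
  fv.insert p.1 (d.insert p.2 (d.getD p.2 0 + 1))

def gfvStepR' (fv : PySem.Dict Int (PySem.Dict (List Int) Int)) (kc : (Int × List Int) × Int) :
    PySem.Dict Int (PySem.Dict (List Int) Int) :=
  fv.insert kc.1.1 ((fv.getD kc.1.1 PySem.Dict.empty).insert kc.1.2 kc.2)

lemma gfv_stepR_eq (fv : PySem.Dict Int (PySem.Dict (List Int) Int)) (kc : (Int × List Int) × Int) :
    gfvStepR fv kc = gfvStepR' fv kc := by
  simp only [gfvStepR, gfvStepR']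
  by_cases h : fv.contains kc.1.1
  · rw [PySem.Dict.setdefault_of_contains fv PySem.Dict.empty h]
  · rw [PySem.Dict.setdefault_of_not_contains fv PySem.Dict.empty (by simpa using h),
      PySem.Dict.getD_insert_self, PySem.Dict.insert_insert_self,
      PySem.Dict.getD_of_not_contains fv PySem.Dict.empty (by simpa using h)]

lemma gfv_foldl_stepR_eq (l : List ((Int × List Int) × Int))
    (fv : PySem.Dict Int (PySem.Dict (List Int) Int)) :
    l.foldl gfvStepR fv = l.foldl gfvStepR' fv := by
  induction l generalizing fv with
  | nil => rfl
  | cons q l ih => simp only [List.foldl_cons, gfv_stepR_eq, ih]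

-- two inserts at distinct keys commute when the first key is already present
lemma gfv_insert_swap {κ ν : Type} [BEq κ] [LawfulBEq κ] (d : PySem.Dict κ ν) {a b : κ} (v w : ν)
    (ha : d.contains a = true) (hne : b ≠ a) :
    (d.insert b w).insert a v = (d.insert a v).insert b w := by
  have hba : (b == a) = false := by simp [hne]
  apply PySem.Dict.ext
  have h1 : (d.insert b w).contains a = true := by
    rw [PySem.Dict.contains_insert]; simp [ha]
  by_cases hb : d.contains b = true
  · have h3 : (d.insert a v).contains b = true := by
      rw [PySem.Dict.contains_insert]; simp [hb]
    rw [PySem.Dict.items_insert_of_contains (d.insert b w) v h1,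
      PySem.Dict.items_insert_of_contains d w hb,
      PySem.Dict.items_insert_of_contains (d.insert a v) w h3,
      PySem.Dict.items_insert_of_contains d v ha,
      List.map_map, List.map_map]
    apply List.map_congr_left
    intro p _
    by_cases hpa : p.1 = a <;> by_cases hpb : p.1 = b <;>
      simp [Function.comp, hpa, hpb, Ne.symm hne, hba]
  · have hb' : d.contains b = false := by simpa using hb
    have h3 : (d.insert a v).contains b = false := by
      rw [PySem.Dict.contains_insert, hba, hb']; rfl
    rw [PySem.Dict.items_insert_of_contains (d.insert b w) v h1,
      PySem.Dict.items_insert_of_not_contains d w hb',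
      PySem.Dict.items_insert_of_not_contains (d.insert a v) w h3,
      PySem.Dict.items_insert_of_contains d v ha,
      List.map_append]
    simp [hba]

-- A's "set to 1 / add 1" branch is a single unconditional bump of the inner dict
lemma gfv_bump (f : PySem.Dict Int (PySem.Dict (List Int) Int)) (k : Int)
    (d : PySem.Dict (List Int) Int) (s : List Int) :
    (if d.contains s = false then f.insert k (d.insert s 1)
     else f.insert k (d.insert s (d.getD s 0 + 1)))
      = f.insert k (d.insert s (d.getD s 0 + 1)) := by
  by_cases h : d.contains s = true
  · simp [h]
  · simp [PySem.Dict.getD_of_not_contains d 0 (by simpa using h)]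

-- A's bond step is the record step applied to (i, sig) and then (j, sig)
lemma gfv_stepA_eq (fv : PySem.Dict Int (PySem.Dict (List Int) Int)) (b : Int × Int × List Int) :
    gfvStepA fv b = gfvStepP (gfvStepP fv (b.1, b.2.2)) (b.2.1, b.2.2) := by
  obtain ⟨i, j, s⟩ := b
  simp only [gfvStepA, gfvStepP, gfv_bump]
  set f1 := if fv.contains i then fv else fv.insert i PySem.Dict.empty with hf1def
  have hf1i : f1.contains i = true := by
    rw [hf1def]
    by_cases h : fv.contains i = true
    · rw [if_pos h]; exact h
    · rw [if_neg h]; exact PySem.Dict.contains_insert_self _ _ _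
  set f2 := if f1.contains j then f1 else f1.insert j PySem.Dict.empty with hf2def
  set g1 := f1.insert i ((f1.getD i PySem.Dict.empty).insert s
      ((f1.getD i PySem.Dict.empty).getD s 0 + 1)) with hg1def
  have key : f2.insert i ((f2.getD i PySem.Dict.empty).insert s
      ((f2.getD i PySem.Dict.empty).getD s 0 + 1))
      = (if g1.contains j then g1 else g1.insert j PySem.Dict.empty) := by
    by_cases hij : i = j
    · subst hij
      rw [hf2def, if_pos hf1i, if_pos (by rw [hg1def]; exact PySem.Dict.contains_insert_self _ _ _)]
    · by_cases hj : f1.contains j = true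
      · rw [hf2def, if_pos hj,
          if_pos (by rw [hg1def, PySem.Dict.contains_insert]; simp [hj])]
      · have hj' : f1.contains j = false := by simpa using hj
        have hjne : (j == i) = false := by simp [Ne.symm hij]
        rw [hf2def, if_neg hj,
          if_neg (by rw [hg1def, PySem.Dict.contains_insert, hjne, hj']; simp),
          PySem.Dict.getD_insert_of_ne _ _ _ hij,
          gfv_insert_swap f1 _ PySem.Dict.empty hf1i (Ne.symm hij), hg1def]
  rw [key]

-- folding A's bond step is folding the record step over the flattened record list
lemma gfv_bridge (L : List (Int × Int × List Int))
    (fv : PySem.Dict Int (PySem.Dict (List Int) Int)) :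
    L.foldl gfvStepA fv
      = (L.flatMap (fun b => [(b.1, b.2.2), (b.2.1, b.2.2)])).foldl gfvStepP fv := by
  induction L generalizing fv with
  | nil => rfl
  | cons b L ih =>
    simp only [List.flatMap_cons, List.foldl_cons, List.foldl_append, gfv_stepA_eq]
    exact ih _

-- lookup facts about the regroup fold
lemma gfv_rit_lookup (l : List ((Int × List Int) × Int)) (a : Int) (s : List Int)
    (h : (a, s) ∉ l.map (·.1)) :
    ((l.foldl gfvStepR' PySem.Dict.empty).getD a PySem.Dict.empty).getD s 0 = 0 := by
  induction l using List.reverseRecOn with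
  | nil => simp [PySem.Dict.getD_empty]
  | append_singleton l q ih =>
    simp only [List.map_append, List.map_cons, List.map_nil, List.mem_append,
      List.mem_singleton, not_or] at h
    rw [List.foldl_append, List.foldl_cons, List.foldl_nil]
    set fv := l.foldl gfvStepR' PySem.Dict.empty with hfv
    show (((fv.insert q.1.1 ((fv.getD q.1.1 PySem.Dict.empty).insert q.1.2 q.2)).getD a
        PySem.Dict.empty).getD s 0) = 0
    by_cases hA : q.1.1 = a
    · have hs : q.1.2 ≠ s := by
        intro hs; exact h.2 (by rw [← hA, ← hs])
      rw [hA, PySem.Dict.getD_insert_self, PySem.Dict.getD_insert_of_ne _ _ _ (Ne.symm hs)]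
      exact ih h.1
    · rw [PySem.Dict.getD_insert_of_ne _ _ _ (Ne.symm hA)]
      exact ih h.1

lemma gfv_rit_contains (l : List ((Int × List Int) × Int)) (a : Int) (s : List Int)
    (h : (a, s) ∈ l.map (·.1)) :
    (l.foldl gfvStepR' PySem.Dict.empty).contains a = true ∧
      ((l.foldl gfvStepR' PySem.Dict.empty).getD a PySem.Dict.empty).contains s = true := by
  induction l using List.reverseRecOn with
  | nil => simp at h
  | append_singleton l q ih =>
    rw [List.foldl_append, List.foldl_cons, List.foldl_nil]
    set fv := l.foldl gfvStepR' PySem.Dict.empty with hfv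
    show ((fv.insert q.1.1 ((fv.getD q.1.1 PySem.Dict.empty).insert q.1.2 q.2)).contains a = true) ∧
      (((fv.insert q.1.1 ((fv.getD q.1.1 PySem.Dict.empty).insert q.1.2 q.2)).getD a
          PySem.Dict.empty).contains s = true)
    simp only [List.map_append, List.map_cons, List.map_nil, List.mem_append,
      List.mem_singleton] at h
    by_cases hA : q.1.1 = a
    · constructor
      · rw [hA]; exact PySem.Dict.contains_insert_self _ _ _
      · rw [hA, PySem.Dict.getD_insert_self]
        rcases h with h | h
        · rw [PySem.Dict.contains_insert]
          simp [(ih h).2]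
        · have : q.1.2 = s := by
            have := congrArg Prod.snd h.symm; simpa using this
          rw [this]; exact PySem.Dict.contains_insert_self _ _ _
    · have h' : (a, s) ∈ l.map (·.1) := by
        rcases h with h | h
        · exact h
        · exact absurd (congrArg Prod.fst h.symm) (by simpa using hA)
      constructor
      · rw [PySem.Dict.contains_insert]; simp [(ih h').1]
      · rw [PySem.Dict.getD_insert_of_ne _ _ _ (Ne.symm hA)]
        exact (ih h').2

-- the record step commutes past a regroup step at a different (atom, signature) key
lemma gfv_comm (fv : PySem.Dict Int (PySem.Dict (List Int) Int)) (p : Int × List Int)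
    (q : (Int × List Int) × Int) (h1 : fv.contains p.1 = true)
    (h2 : (fv.getD p.1 PySem.Dict.empty).contains p.2 = true) (hne : q.1 ≠ p) :
    gfvStepP (gfvStepR' fv q) p = gfvStepR' (gfvStepP fv p) q := by
  obtain ⟨a, s⟩ := p
  obtain ⟨⟨a', s'⟩, c⟩ := q
  unfold gfvStepP gfvStepR'
  simp only at h1 h2 ⊢
  have hga : ((fv.insert a' ((fv.getD a' PySem.Dict.empty).insert s' c)).contains a) = true := by
    rw [PySem.Dict.contains_insert]; simp [h1]
  rw [if_pos hga, if_pos h1]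
  by_cases hA : a' = a
  · subst hA
    have hs : s' ≠ s := by intro h; exact hne (by rw [h])
    rw [PySem.Dict.getD_insert_self, PySem.Dict.getD_insert_self,
      PySem.Dict.getD_insert_of_ne _ _ _ (Ne.symm hs),
      PySem.Dict.insert_insert_self, PySem.Dict.insert_insert_self,
      gfv_insert_swap _ _ _ h2 hs]
  · rw [PySem.Dict.getD_insert_of_ne _ _ _ (Ne.symm hA),
      PySem.Dict.getD_insert_of_ne _ _ _ hA,
      gfv_insert_swap fv _ _ h1 hA]

-- bumping a key already in the flat table = regrouping the table with that entry's count bumped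
lemma gfv_rit_update (l : List ((Int × List Int) × Int)) (p : Int × List Int) (c : Int)
    (hnd : (l.map (·.1)).Nodup) (hm : (p, c) ∈ l) :
    gfvStepP (l.foldl gfvStepR' PySem.Dict.empty) p
      = (l.map (fun q => if q.1 == p then (p, c + 1) else q)).foldl gfvStepR' PySem.Dict.empty := by
  induction l using List.reverseRecOn with
  | nil => simp at hm
  | append_singleton l q ih =>
    simp only [List.map_append, List.map_cons, List.map_nil] at hnd ⊢
    have hnd1 : (l.map (·.1)).Nodup := (List.nodup_append.mp hnd).1
    have hfresh : q.1 ∉ l.map (·.1) := by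
      intro hq
      have hdisj := (List.nodup_append.mp hnd).2.2
      exact hdisj _ hq _ (List.mem_singleton_self _) rfl
    rw [List.foldl_append, List.foldl_cons, List.foldl_nil, List.foldl_append,
      List.foldl_cons, List.foldl_nil]
    by_cases hq : q.1 = p
    · -- the bumped entry is the last one
      have hcq : q = (p, c) := by
        rcases List.mem_append.mp hm with h | h
        · exfalso
          have : p ∈ l.map (·.1) := List.mem_map.mpr ⟨(p, c), h, rfl⟩
          rw [← hq] at this; exact hfresh this
        · exact (List.mem_singleton.mp h).symm
      subst hcq
      have hmapid : l.map (fun q => if q.1 == (p : Int × List Int) then (p, c + 1) else q) = l := by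
        conv_rhs => rw [← List.map_id l]
        apply List.map_congr_left
        intro x hx
        have hxp : x.1 ≠ p := by
          intro h
          apply hfresh
          rw [hq, ← h]
          exact List.mem_map.mpr ⟨x, hx, rfl⟩
        simp [hxp]
      rw [hmapid]
      simp only [BEq.rfl, if_pos]
      unfold gfvStepP gfvStepR'
      obtain ⟨a, s⟩ := p
      simp only
      rw [if_pos (by rw [PySem.Dict.contains_insert]; simp)]
      rw [PySem.Dict.getD_insert_self, PySem.Dict.getD_insert_self,
        PySem.Dict.insert_insert_self, PySem.Dict.insert_insert_self]
    · -- the bumped entry is in l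
      have hm' : (p, c) ∈ l := by
        rcases List.mem_append.mp hm with h | h
        · exact h
        · exfalso; exact hq (congrArg Prod.fst (List.mem_singleton.mp h)).symm
      have hp1 : p ∈ l.map (·.1) := List.mem_map.mpr ⟨(p, c), hm', rfl⟩
      obtain ⟨hc1, hc2⟩ := gfv_rit_contains l p.1 p.2 (by simpa using hp1)
      rw [show (if q.1 == p then (p, c + 1) else q) = q by simp [hq]]
      rw [← ih hnd1 hm']
      exact gfv_comm _ p q hc1 hc2 hq

-- main invariant: A-style record processing = regrouping the flat counter
lemma gfv_main (P : List (Int × List Int)) :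
    P.foldl gfvStepP PySem.Dict.empty
      = ((PySem.Dict.counter P).items).foldl gfvStepR' PySem.Dict.empty := by
  induction P using List.reverseRecOn with
  | nil => rfl
  | append_singleton P p ih =>
    have hcnt : PySem.Dict.counter (P ++ [p])
        = (PySem.Dict.counter P).insert p ((PySem.Dict.counter P).getD p 0 + 1) := by
      rw [PySem.Dict.counter_append_singleton]; rfl
    rw [List.foldl_append, List.foldl_cons, List.foldl_nil, ih, hcnt]
    set C := PySem.Dict.counter P with hC
    by_cases hc : C.contains p = true
    · -- p already counted: its entry's value is bumped in place
      have hnd : C.keys.Nodup := PySem.Dict.nodup_keys_counter P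
      have hsome : (C.get? p).isSome := by
        rw [← PySem.Dict.contains_eq_isSome_get?]; exact hc
      obtain ⟨v, hv⟩ := Option.isSome_iff_exists.mp hsome
      have hmem : (p, v) ∈ C.items := PySem.Dict.mem_items_of_get?_eq_some C hv
      have hgd : C.getD p 0 = v := PySem.Dict.getD_of_get?_eq_some C 0 hv
      rw [show ((C.insert p (C.getD p 0 + 1)).items)
            = C.items.map (fun q => if q.1 == p then (p, v + 1) else q) by
        rw [PySem.Dict.items_insert_of_contains _ _ hc, hgd]]
      exact gfv_rit_update C.items p v (by simpa [PySem.Dict.keys] using hnd) hmem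
    · -- p is new in the counter: its entry is appended
      have hc' : C.contains p = false := by simpa using hc
      rw [PySem.Dict.getD_of_not_contains _ _ hc',
        show ((C.insert p (0 + 1)).items) = C.items ++ [(p, 0 + 1)] from
          PySem.Dict.items_insert_of_not_contains _ _ hc',
        List.foldl_append, List.foldl_cons, List.foldl_nil]
      set fv := C.items.foldl gfvStepR' PySem.Dict.empty with hfv
      unfold gfvStepP gfvStepR'
      obtain ⟨a, s⟩ := p
      simp only
      by_cases hfa : fv.contains a = true
      · have hnotin : (a, s) ∉ C.items.map (·.1) := by
          intro hin
          have : C.contains (a, s) = true := by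
            unfold PySem.Dict.contains
            simp only [List.any_eq_true]
            obtain ⟨q, hq, hq1⟩ := List.mem_map.mp hin
            exact ⟨q, hq, by simp [hq1]⟩
          rw [this] at hc'; exact absurd hc' (by simp)
        rw [if_pos hfa, gfv_rit_lookup C.items a s hnotin]
      · rw [if_neg (by simpa using hfa), PySem.Dict.getD_insert_self,
          PySem.Dict.insert_insert_self, PySem.Dict.getD_empty,
          PySem.Dict.getD_of_not_contains fv PySem.Dict.empty (by simpa using hfa)]

-- ===== VERDICT (by name: the statement is the Claim_ definition above) =====
theorem get_feature_vectors_spec : Claim_equal_get_feature_vectors := by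
  intro signatures _
  unfold Spec_get_feature_vectors get_feature_vectors get_feature_vectors_alt
  simp only [gfv_bridge, gfv_main, gfv_foldl_stepR_eq,
    PySem.Dict.foldl_insert_getD_add_one_eq_counter]
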